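-- pv_equiv track=rewrite | github.com/mdasrafulislam707077/chat_crafter | sentence_similarity.py | sequence_difference
-- ===== SOURCE A (Python) =====
-- def levenshtein_distance(word1, word2):
--     # Initialize matrix
--     len_word1 = len(word1)
--     len_word2 = len(word2)
--     dp = [[0] * (len_word2 + 1) for _ in range(len_word1 + 1)]
--
--     for i in range(len_word1 + 1):
--         for j in range(len_word2 + 1):
--             if i == 0:
--                 dp[i][j] = j  # First word is empty, so add characters from word2
--             elif j == 0:
--                 dp[i][j] = i  # Second word is empty, so add characters from word1
--             elif word1[i - 1] == word2[j - 1]: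
--                 dp[i][j] = dp[i - 1][j - 1]  # No change needed if characters are the same
--             else:
--                 dp[i][j] = 1 + min(dp[i - 1][j], dp[i][j - 1], dp[i - 1][j - 1])  # Insert, remove, or replace
--
--     return dp[len_word1][len_word2]
--
-- def sequence_difference(words1, words2):
--     diff_count = 0
--     max_len = max(len(words1), len(words2))
--
--     # Compare word-by-word with fuzzy matching
--     for i in range(max_len):
--         if i >= len(words1) or i >= len(words2):
--             diff_count += 1  # If one sentence is shorter
--         else:
--             # Compare using Levenshtein distance for fuzzy matching
--             lev_distance = levenshtein_distance(words1[i], words2[i])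
--             # If distance is more than 1 (or a threshold you define), consider it as a difference
--             if lev_distance > 1:
--                 diff_count += 1
--
--     return diff_count
-- ===== SOURCE B (Python) =====
-- def _close(a, b):
--     # edit distance <= 1 check in one linear pass (no DP matrix)
--     i = 0
--     while i < len(a) and i < len(b) and a[i] == b[i]:
--         i += 1
--     if len(a) == len(b):
--         return a[i+1:] == b[i+1:]
--     if len(a) + 1 == len(b):
--         return a[i:] == b[i+1:]
--     if len(b) + 1 == len(a):
--         return a[i+1:] == b[i:]
--     return False
--
-- def sequence_difference(words1, words2):
--     diff_count = abs(len(words1) - len(words2))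
--     for w1, w2 in zip(words1, words2):
--         if not _close(w1, w2):
--             diff_count += 1
--     return diff_count
-- ===== Notes on version B (the rewrite author's own statement) =====
-- stated objective: faster
-- what changed: Per word pair, B replaces A's full O(len1*len2) Levenshtein DP matrix by a single linear scan that decides 'edit distance <= 1' directly (common prefix, then suffix comparison with at most one skipped character), and replaces A's index loop over range(max_len) by abs(len difference) plus a zip.
import Mathlib
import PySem

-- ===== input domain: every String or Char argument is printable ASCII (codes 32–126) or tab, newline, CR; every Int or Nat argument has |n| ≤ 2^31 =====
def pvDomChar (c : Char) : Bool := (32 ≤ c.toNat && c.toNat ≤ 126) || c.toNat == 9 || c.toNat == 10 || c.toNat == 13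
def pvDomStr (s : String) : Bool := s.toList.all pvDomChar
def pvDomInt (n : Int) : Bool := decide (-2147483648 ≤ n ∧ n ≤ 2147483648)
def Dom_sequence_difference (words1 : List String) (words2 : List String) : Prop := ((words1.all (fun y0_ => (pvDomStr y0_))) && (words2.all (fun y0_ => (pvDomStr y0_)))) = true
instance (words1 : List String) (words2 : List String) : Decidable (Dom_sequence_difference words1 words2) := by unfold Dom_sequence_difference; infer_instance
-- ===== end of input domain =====

-- B replaces A's full O(m·n) Levenshtein DP matrix per word pair by a one-pass
-- "edit distance ≤ 1" band check (objective: faster, asymptotic).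

-- ===== PORT A =====
-- helpers for the dp matrix (indices are always in range in A's code)
def pvGet2 (dp : List (List Int)) (i j : Nat) : Int := (dp.getD i []).getD j 0
def pvSet2 (dp : List (List Int)) (i j : Nat) (v : Int) : List (List Int) :=
  dp.set i ((dp.getD i []).set j v)

-- one cell of A's dp update, branches in A's order
def pvCell (w1 w2 : List Char) (dp : List (List Int)) (i j : Nat) : Int :=
  if i = 0 then (j : Int)
  else if j = 0 then (i : Int)
  else if w1.getD (i-1) ' ' = w2.getD (j-1) ' ' then pvGet2 dp (i-1) (j-1)
  else 1 + min (min (pvGet2 dp (i-1) j) (pvGet2 dp i (j-1))) (pvGet2 dp (i-1) (j-1))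

def pvInner (w1 w2 : List Char) (i : Nat) (dp : List (List Int)) (j : Nat) : List (List Int) :=
  pvSet2 dp i j (pvCell w1 w2 dp i j)

def pvRow (w1 w2 : List Char) (n : Nat) (dp : List (List Int)) (i : Nat) : List (List Int) :=
  (List.range (n+1)).foldl (pvInner w1 w2 i) dp

def levenshtein_distance (word1 word2 : String) : Int :=
  let w1 := word1.toList
  let w2 := word2.toList
  let m := w1.length
  let n := w2.length
  let dp0 : List (List Int) := List.replicate (m+1) (List.replicate (n+1) 0)
  let dp := (List.range (m+1)).foldl (pvRow w1 w2 n) dp0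
  pvGet2 dp m n

def sequence_difference (words1 : List String) (words2 : List String) : Int :=
  (List.range (max words1.length words2.length)).foldl (fun diff i =>
    if words1.length ≤ i ∨ words2.length ≤ i then diff + 1
    else if levenshtein_distance (words1.getD i "") (words2.getD i "") > 1 then diff + 1
    else diff) 0

-- ===== PORT B =====
-- port of Source B's while loop: length of the common prefix
def pvMismatchIdx : List Char → List Char → Nat
  | x::xs, y::ys => if x = y then pvMismatchIdx xs ys + 1 else 0
  | _, _ => 0

-- port of Source B's _close on the character lists
def pvCloseL (a b : List Char) : Bool :=
  let i := pvMismatchIdx a b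
  if a.length = b.length then a.drop (i+1) == b.drop (i+1)
  else if a.length + 1 = b.length then a.drop i == b.drop (i+1)
  else if b.length + 1 = a.length then a.drop (i+1) == b.drop i
  else false

def pvClose (a b : String) : Bool := pvCloseL a.toList b.toList

def sequence_difference_alt (words1 : List String) (words2 : List String) : Int :=
  (words1.zip words2).foldl (fun d p => if pvClose p.1 p.2 then d else d + 1)
    ((((words1.length : Int) - (words2.length : Int)).natAbs : Nat) : Int)

-- ===== PRECONDITION & SPEC =====
def Spec_sequence_difference (words1 : List String) (words2 : List String) (out : Int) : Prop := out = sequence_difference_alt words1 words2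
instance (words1 : List String) (words2 : List String) (out : Int) : Decidable (Spec_sequence_difference words1 words2 out) := by unfold Spec_sequence_difference; infer_instance

-- ===== CLAIM (what is proved, stated in full; the proofs are below) =====
def Claim_equal_sequence_difference : Prop := ∀ (words1 : List String) (words2 : List String), Dom_sequence_difference words1 words2 → Spec_sequence_difference words1 words2 (sequence_difference words1 words2)

-- ===== LEMMAS AND PROOFS =====

-- reference Levenshtein distance (recursive)
def lev : List Char → List Char → Nat
  | [], ys => ys.length
  | x::xs, [] => (x::xs).length
  | x::xs, y::ys =>
    if x = y then lev xs ys
    else 1 + min (min (lev xs (y::ys)) (lev (x::xs) ys)) (lev xs ys)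
termination_by xs ys => xs.length + ys.length
decreasing_by all_goals (simp only [List.length_cons]; omega)

lemma lev_nil_right (xs : List Char) : lev xs [] = xs.length := by
  cases xs <;> simp [lev]

lemma lev_cons_cons (x y : Char) (xs ys : List Char) :
    lev (x::xs) (y::ys) =
      if x = y then lev xs ys
      else 1 + min (min (lev xs (y::ys)) (lev (x::xs) ys)) (lev xs ys) := by
  simp [lev]

lemma lev_self (xs : List Char) : lev xs xs = 0 := by
  induction xs with
  | nil => simp [lev]
  | cons x xs ih => simp [lev_cons_cons, ih]

lemma lev_eq_zero {xs ys : List Char} (h : lev xs ys = 0) : xs = ys := by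
  induction xs generalizing ys with
  | nil =>
    have hy : ys.length = 0 := by simpa [lev] using h
    exact (List.length_eq_zero_iff.mp hy).symm
  | cons x xs ih =>
    cases ys with
    | nil => simp [lev_nil_right] at h
    | cons y ys =>
      rw [lev_cons_cons] at h
      by_cases hxy : x = y
      · simp [hxy] at h; simp [hxy, ih h]
      · simp [hxy] at h

lemma lev_insert (a : Char) (s : List Char) : lev s (a::s) ≤ 1 := by
  induction s with
  | nil => simp [lev]
  | cons h t ih =>
    rw [lev_cons_cons]
    by_cases hha : h = a
    · subst hha; simpa using ih
    · have h0 : lev (h::t) (h::t) = 0 := lev_self _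
      simp [hha]; omega

lemma lev_delete (a : Char) (s : List Char) : lev (a::s) s ≤ 1 := by
  induction s with
  | nil => simp [lev]
  | cons h t ih =>
    rw [lev_cons_cons]
    by_cases hah : a = h
    · subst hah; simpa using ih
    · have h0 : lev (h::t) (h::t) = 0 := lev_self _
      simp [hah]; omega

lemma lev_subst (a b : Char) (s : List Char) : lev (a::s) (b::s) ≤ 1 := by
  rw [lev_cons_cons]
  by_cases hab : a = b
  · simp [hab, lev_self]
  · have h0 : lev s s = 0 := lev_self _
    simp [hab]; omega

lemma lev_append_left (p u v : List Char) : lev (p ++ u) (p ++ v) = lev u v := by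
  induction p with
  | nil => simp
  | cons c p ih => simpa [lev_cons_cons] using ih

-- "edit distance ≤ 1" as a structural predicate
def Close (xs ys : List Char) : Prop :=
  xs = ys ∨
  (∃ p a b s, xs = p ++ a :: s ∧ ys = p ++ b :: s) ∨
  (∃ p a s, xs = p ++ s ∧ ys = p ++ a :: s) ∨
  (∃ p a s, xs = p ++ a :: s ∧ ys = p ++ s)

lemma close_of_lev_le_one : ∀ xs ys : List Char, lev xs ys ≤ 1 → Close xs ys := by
  intro xs
  induction xs with
  | nil =>
    intro ys h
    simp [lev] at h
    match ys, h with
    | [], _ => exact Or.inl rfl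
    | [b], _ => exact Or.inr (Or.inr (Or.inl ⟨[], b, [], by simp, by simp⟩))
  | cons x xs ih =>
    intro ys h
    cases ys with
    | nil =>
      rw [lev_nil_right] at h
      have : xs = [] := by cases xs <;> simp_all
      subst this
      exact Or.inr (Or.inr (Or.inr ⟨[], x, [], by simp, by simp⟩))
    | cons y ys =>
      rw [lev_cons_cons] at h
      by_cases hxy : x = y
      · subst hxy
        simp at h
        rcases ih ys h with he | ⟨p,a,b,s,h1,h2⟩ | ⟨p,a,s,h1,h2⟩ | ⟨p,a,s,h1,h2⟩
        · exact Or.inl (by rw [he])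
        · exact Or.inr (Or.inl ⟨x::p, a, b, s, by simp [h1], by simp [h2]⟩)
        · exact Or.inr (Or.inr (Or.inl ⟨x::p, a, s, by simp [h1], by simp [h2]⟩))
        · exact Or.inr (Or.inr (Or.inr ⟨x::p, a, s, by simp [h1], by simp [h2]⟩))
      · simp [hxy] at h
        have hmin : lev xs (y::ys) = 0 ∨ lev (x::xs) ys = 0 ∨ lev xs ys = 0 := by omega
        rcases hmin with h0 | h0 | h0
        · have := lev_eq_zero h0
          exact Or.inr (Or.inr (Or.inr ⟨[], x, y::ys, by simp [this], by simp⟩))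
        · have := lev_eq_zero h0
          exact Or.inr (Or.inr (Or.inl ⟨[], y, x::xs, by simp, by simp [← this]⟩))
        · have := lev_eq_zero h0
          exact Or.inr (Or.inl ⟨[], x, y, xs, by simp, by simp [← this]⟩)

lemma lev_le_one_of_close {xs ys : List Char} (h : Close xs ys) : lev xs ys ≤ 1 := by
  rcases h with he | ⟨p,a,b,s,h1,h2⟩ | ⟨p,a,s,h1,h2⟩ | ⟨p,a,s,h1,h2⟩
  · subst he; simp [lev_self]
  · subst h1; subst h2; rw [lev_append_left]; exact lev_subst a b s
  · subst h1; subst h2; rw [lev_append_left]; exact lev_insert a s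
  · subst h1; subst h2; rw [lev_append_left]; exact lev_delete a s

lemma lev_le_one_iff (xs ys : List Char) : lev xs ys ≤ 1 ↔ Close xs ys :=
  ⟨close_of_lev_le_one xs ys, lev_le_one_of_close⟩

lemma close_rev_of_close {xs ys : List Char} (h : Close xs ys) :
    Close xs.reverse ys.reverse := by
  rcases h with he | ⟨p,a,b,s,h1,h2⟩ | ⟨p,a,s,h1,h2⟩ | ⟨p,a,s,h1,h2⟩
  · exact Or.inl (by rw [he])
  · exact Or.inr (Or.inl ⟨s.reverse, a, b, p.reverse, by simp [h1], by simp [h2]⟩)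
  · refine Or.inr (Or.inr (Or.inl ?_))
    exact ⟨s.reverse, a, p.reverse, by simp [h1], by simp [h2]⟩
  · refine Or.inr (Or.inr (Or.inr ?_))
    exact ⟨s.reverse, a, p.reverse, by simp [h1], by simp [h2]⟩

lemma close_rev_iff (xs ys : List Char) : Close xs.reverse ys.reverse ↔ Close xs ys :=
  ⟨fun h => by simpa using close_rev_of_close h, close_rev_of_close⟩

-- Close under a shared head / distinct heads
lemma close_cons_iff (c : Char) (xs ys : List Char) :
    Close (c::xs) (c::ys) ↔ Close xs ys := by
  constructor
  · rintro (he | ⟨p,a,b,s,h1,h2⟩ | ⟨p,a,s,h1,h2⟩ | ⟨p,a,s,h1,h2⟩)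
    · exact Or.inl (by injection he)
    · cases p with
      | nil =>
        simp at h1 h2
        exact Or.inl (h1.2.trans h2.2.symm)
      | cons d p =>
        simp at h1 h2
        exact Or.inr (Or.inl ⟨p, a, b, s, h1.2, h2.2⟩)
    · cases p with
      | nil =>
        simp at h1 h2
        refine Or.inr (Or.inr (Or.inl ⟨[], c, xs, by simp, ?_⟩))
        simp [h2.2, ← h1, h2.1]
      | cons d p =>
        simp at h1 h2
        exact Or.inr (Or.inr (Or.inl ⟨p, a, s, h1.2, h2.2⟩))
    · cases p with
      | nil =>
        simp at h1 h2
        refine Or.inr (Or.inr (Or.inr ⟨[], c, ys, ?_, by simp⟩))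
        simp [h1.2, ← h2, h1.1]
      | cons d p =>
        simp at h1 h2
        exact Or.inr (Or.inr (Or.inr ⟨p, a, s, h1.2, h2.2⟩))
  · rintro (he | ⟨p,a,b,s,h1,h2⟩ | ⟨p,a,s,h1,h2⟩ | ⟨p,a,s,h1,h2⟩)
    · exact Or.inl (by rw [he])
    · exact Or.inr (Or.inl ⟨c::p, a, b, s, by simp [h1], by simp [h2]⟩)
    · exact Or.inr (Or.inr (Or.inl ⟨c::p, a, s, by simp [h1], by simp [h2]⟩))
    · exact Or.inr (Or.inr (Or.inr ⟨c::p, a, s, by simp [h1], by simp [h2]⟩))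

lemma close_cons_ne_iff {x y : Char} (hxy : x ≠ y) (xs ys : List Char) :
    Close (x::xs) (y::ys) ↔ (xs = ys ∨ ys = x::xs ∨ xs = y::ys) := by
  constructor
  · rintro (he | ⟨p,a,b,s,h1,h2⟩ | ⟨p,a,s,h1,h2⟩ | ⟨p,a,s,h1,h2⟩)
    · exact absurd (by injection he) hxy
    · cases p with
      | nil => simp at h1 h2; exact Or.inl (h1.2.trans h2.2.symm)
      | cons d p => simp at h1 h2; exact absurd (h1.1.trans h2.1.symm) hxy
    · cases p with
      | nil =>
        simp at h1 h2
        exact Or.inr (Or.inl (by rw [h2.2, ← h1]))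
      | cons d p => simp at h1 h2; exact absurd (h1.1.trans h2.1.symm) hxy
    · cases p with
      | nil =>
        simp at h1 h2
        exact Or.inr (Or.inr (by rw [h1.2, ← h2]))
      | cons d p => simp at h1 h2; exact absurd (h1.1.trans h2.1.symm) hxy
  · rintro (he | he | he)
    · exact Or.inr (Or.inl ⟨[], x, y, xs, by simp, by simp [he]⟩)
    · exact Or.inr (Or.inr (Or.inl ⟨[], y, x::xs, by simp, by simp [he]⟩))
    · exact Or.inr (Or.inr (Or.inr ⟨[], x, y::ys, by simp [he], by simp⟩))

lemma close_nil_left (ys : List Char) : Close [] ys ↔ ys.length ≤ 1 := by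
  constructor
  · rintro (he | ⟨p,a,b,s,h1,h2⟩ | ⟨p,a,s,h1,h2⟩ | ⟨p,a,s,h1,h2⟩)
    · simp [← he]
    · simp at h1
    · have hp : p = [] := by
        cases p with
        | nil => rfl
        | cons d q => exact absurd h1 (by simp)
      subst hp
      have hs : s = [] := by simpa using h1.symm
      simp [h2, hs]
    · simp at h1
  · intro h
    match ys, h with
    | [], _ => exact Or.inl rfl
    | [b], _ => exact Or.inr (Or.inr (Or.inl ⟨[], b, [], by simp, by simp⟩))

lemma close_nil_right (xs : List Char) : Close xs [] ↔ xs.length ≤ 1 := by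
  constructor
  · rintro (he | ⟨p,a,b,s,h1,h2⟩ | ⟨p,a,s,h1,h2⟩ | ⟨p,a,s,h1,h2⟩)
    · simp [he]
    · simp at h2
    · simp at h2
    · have hp : p = [] := by
        cases p with
        | nil => rfl
        | cons d q => exact absurd h2 (by simp)
      subst hp
      have hs : s = [] := by simpa using h2.symm
      simp [h1, hs]
  · intro h
    match xs, h with
    | [], _ => exact Or.inl rfl
    | [a], _ => exact Or.inr (Or.inr (Or.inr ⟨[], a, [], by simp, by simp⟩))

-- B's linear check decides Close
lemma pvCloseL_iff_close : ∀ a b : List Char, pvCloseL a b = true ↔ Close a b := by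
  intro a
  induction a with
  | nil =>
    intro b
    rw [close_nil_left]
    cases b with
    | nil => simp [pvCloseL, pvMismatchIdx]
    | cons y ys => cases ys <;> simp [pvCloseL, pvMismatchIdx]
  | cons x xs ih =>
    intro b
    cases b with
    | nil =>
      rw [close_nil_right]
      cases xs <;> simp [pvCloseL, pvMismatchIdx]
    | cons y ys =>
      by_cases hxy : x = y
      · subst hxy
        have hstep : pvCloseL (x::xs) (x::ys) = pvCloseL xs ys := by
          simp [pvCloseL, pvMismatchIdx]
        rw [hstep, ih ys, close_cons_iff]
      · rw [close_cons_ne_iff hxy]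
        have hmi : pvMismatchIdx (x::xs) (y::ys) = 0 := by simp [pvMismatchIdx, hxy]
        simp only [pvCloseL, hmi, List.length_cons, List.drop_succ_cons, List.drop_zero,
          Nat.add_right_cancel_iff]
        by_cases hl : xs.length = ys.length
        · simp only [if_pos hl, beq_iff_eq]
          constructor
          · exact fun h => Or.inl h
          · rintro (h | h | h)
            · exact h
            · exfalso; have := congrArg List.length h; simp at this; omega
            · exfalso; have := congrArg List.length h; simp at this; omega
        · simp only [if_neg hl]
          by_cases h2 : xs.length + 1 = ys.length
          · simp only [if_pos h2, beq_iff_eq]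
            constructor
            · exact fun h => Or.inr (Or.inl h.symm)
            · rintro (h | h | h)
              · exfalso; have := congrArg List.length h; omega
              · exact h.symm
              · exfalso; have := congrArg List.length h; simp at this; omega
          · simp only [if_neg h2]
            by_cases h3 : ys.length + 1 = xs.length
            · simp only [if_pos h3, beq_iff_eq]
              constructor
              · exact fun h => Or.inr (Or.inr h)
              · rintro (h | h | h)
                · exfalso; have := congrArg List.length h; omega
                · exfalso; have := congrArg List.length h; simp at this; omega
                · exact h
            · simp only [if_neg h3]
              constructor
              · intro h; simp at h
              · rintro (h | h | h) <;>
                  (exfalso; have := congrArg List.length h; simp at this; omega)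

-- ===== correctness of A's DP =====

def pvLf (w1 w2 : List Char) (i j : Nat) : Int :=
  (lev ((w1.take i).reverse) ((w2.take j).reverse) : Int)

lemma take_reverse_cons (l : List Char) (i : Nat) (h1 : 1 ≤ i) (h2 : i ≤ l.length) :
    (l.take i).reverse = l.getD (i-1) ' ' :: (l.take (i-1)).reverse := by
  obtain ⟨k, rfl⟩ : ∃ k, i = k + 1 := ⟨i - 1, by omega⟩
  have hk : k < l.length := by omega
  rw [List.take_succ]
  simp [List.getElem?_eq_getElem hk, List.getD_eq_getElem _ _ hk]

lemma pvLf_zero_left (w1 w2 : List Char) (j : Nat) (hj : j ≤ w2.length) :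
    pvLf w1 w2 0 j = (j : Int) := by
  simp [pvLf, lev, min_eq_left hj]

lemma pvLf_zero_right (w1 w2 : List Char) (i : Nat) (hi : i ≤ w1.length) :
    pvLf w1 w2 i 0 = (i : Int) := by
  simp [pvLf, lev_nil_right, min_eq_left hi]

lemma pvLf_rec (w1 w2 : List Char) (i j : Nat)
    (hi1 : 1 ≤ i) (hi : i ≤ w1.length) (hj1 : 1 ≤ j) (hj : j ≤ w2.length) :
    pvLf w1 w2 i j =
      if w1.getD (i-1) ' ' = w2.getD (j-1) ' ' then pvLf w1 w2 (i-1) (j-1)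
      else 1 + min (min (pvLf w1 w2 (i-1) j) (pvLf w1 w2 i (j-1))) (pvLf w1 w2 (i-1) (j-1)) := by
  unfold pvLf
  rw [take_reverse_cons w1 i hi1 hi, take_reverse_cons w2 j hj1 hj, lev_cons_cons]
  by_cases h : w1.getD (i-1) ' ' = w2.getD (j-1) ' '
  · simp [h]
  · rw [if_neg h, if_neg h]
    rw [← take_reverse_cons w1 i hi1 hi, ← take_reverse_cons w2 j hj1 hj]
    push_cast
    ring

-- shape bookkeeping
def pvShape (m n : Nat) (dp : List (List Int)) : Prop :=
  dp.length = m + 1 ∧ ∀ r, (dp.getD r []).length = if r < m + 1 then n + 1 else 0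

lemma pvShape_set2 {m n : Nat} {dp : List (List Int)} (h : pvShape m n dp)
    (i j : Nat) (v : Int) : pvShape m n (pvSet2 dp i j v) := by
  obtain ⟨hlen, hrow⟩ := h
  refine ⟨by simp [pvSet2, hlen], fun r => ?_⟩
  have hr0 := hrow r
  unfold pvSet2
  by_cases hri : r = i
  · subst hri
    by_cases hr : r < dp.length
    · simp only [List.getD_eq_getElem?_getD] at hr0 ⊢
      rw [List.getElem?_set_self hr, Option.getD_some, List.length_set]
      exact hr0
    · rw [List.set_eq_of_length_le (by omega)]
      exact hr0
  · rw [List.getD_eq_getElem?_getD, List.getElem?_set_ne (fun hh => hri hh.symm),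
      ← List.getD_eq_getElem?_getD]
    exact hr0

lemma pvGet2_set2_eq (dp : List (List Int)) (i j : Nat) (v : Int)
    (hi : i < dp.length) (hj : j < (dp.getD i []).length) :
    pvGet2 (pvSet2 dp i j v) i j = v := by
  unfold pvGet2 pvSet2
  simp only [List.getD_eq_getElem?_getD]
  rw [List.getElem?_set_self hi, Option.getD_some,
    List.getElem?_set_self (by simpa [List.getD_eq_getElem?_getD] using hj), Option.getD_some]

lemma pvGet2_set2_ne (dp : List (List Int)) (i j r c : Nat) (v : Int)
    (hne : ¬ (r = i ∧ c = j)) :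
    pvGet2 (pvSet2 dp i j v) r c = pvGet2 dp r c := by
  unfold pvGet2 pvSet2
  by_cases hri : r = i
  · subst hri
    have hcj : c ≠ j := fun h => hne ⟨rfl, h⟩
    by_cases hr : r < dp.length
    · simp only [List.getD_eq_getElem?_getD]
      rw [List.getElem?_set_self hr, Option.getD_some, List.getElem?_set_ne (Ne.symm hcj)]
    · rw [List.set_eq_of_length_le (by omega)]
  · simp only [List.getD_eq_getElem?_getD]
    rw [List.getElem?_set_ne (fun hh => hri hh.symm)]

-- invariant: rows < i fully correct; row i correct up to column j
def pvInv (w1 w2 : List Char) (i j : Nat) (dp : List (List Int)) : Prop :=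
  pvShape w1.length w2.length dp ∧
  (∀ r c, c ≤ w2.length → (r < i → pvGet2 dp r c = pvLf w1 w2 r c) ∧ (r = i → c < j → pvGet2 dp r c = pvLf w1 w2 r c))

lemma pvInner_inv {w1 w2 : List Char} {i j : Nat} {dp : List (List Int)}
    (hi : i ≤ w1.length) (hj : j ≤ w2.length) (h : pvInv w1 w2 i j dp) :
    pvInv w1 w2 i (j+1) (pvInner w1 w2 i dp j) := by
  obtain ⟨hs, hv⟩ := h
  have hcell : pvCell w1 w2 dp i j = pvLf w1 w2 i j := by
    unfold pvCell
    by_cases hi0 : i = 0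
    · subst hi0
      rw [if_pos rfl, pvLf_zero_left _ _ _ hj]
    · rw [if_neg hi0]
      by_cases hj0 : j = 0
      · subst hj0
        rw [if_pos rfl, pvLf_zero_right _ _ _ hi]
      · rw [if_neg hj0]
        have hv1 : pvGet2 dp (i-1) (j-1) = pvLf w1 w2 (i-1) (j-1) :=
          (hv (i-1) (j-1) (by omega)).1 (by omega)
        have hv2 : pvGet2 dp (i-1) j = pvLf w1 w2 (i-1) j :=
          (hv (i-1) j hj).1 (by omega)
        have hv3 : pvGet2 dp i (j-1) = pvLf w1 w2 i (j-1) :=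
          (hv i (j-1) (by omega)).2 rfl (by omega)
        rw [hv1, hv2, hv3, pvLf_rec w1 w2 i j (by omega) hi (by omega) hj]
  constructor
  · exact pvShape_set2 hs i j _
  · intro r c hc
    constructor
    · intro hr
      rw [pvInner, pvGet2_set2_ne dp i j r c _ (by omega)]
      exact (hv r c hc).1 hr
    · intro hr hcj
      subst hr
      by_cases hcjeq : c = j
      · subst hcjeq
        rw [pvInner, pvGet2_set2_eq dp r c _ (by rw [hs.1]; omega)
          (by rw [hs.2 r, if_pos (by omega)]; omega), hcell]
      · rw [pvInner, pvGet2_set2_ne dp r j r c _ (by omega)]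
        exact (hv r c hc).2 rfl (by omega)

lemma pvRow_inv {w1 w2 : List Char} {i : Nat} {dp : List (List Int)}
    (hi : i ≤ w1.length) (h : pvInv w1 w2 i 0 dp) :
    pvInv w1 w2 (i+1) 0 (pvRow w1 w2 w2.length dp i) := by
  have key : ∀ k, k ≤ w2.length + 1 →
      pvInv w1 w2 i k ((List.range k).foldl (pvInner w1 w2 i) dp) := by
    intro k
    induction k with
    | zero => intro _; simpa using h
    | succ k ih =>
      intro hk
      rw [List.range_succ, List.foldl_append]
      exact pvInner_inv hi (by omega) (ih (by omega))
  have hfin := key (w2.length + 1) (le_refl _)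
  obtain ⟨hs, hv⟩ := hfin
  refine ⟨hs, fun r c hc => ⟨fun hr => ?_, fun hr hc0 => by omega⟩⟩
  unfold pvRow
  by_cases hri : r < i
  · exact (hv r c hc).1 hri
  · have : r = i := by omega
    exact (hv r c hc).2 this (by omega)

lemma pvLev_eq (word1 word2 : String) :
    levenshtein_distance word1 word2 =
      (lev word1.toList.reverse word2.toList.reverse : Int) := by
  unfold levenshtein_distance
  set w1 := word1.toList
  set w2 := word2.toList
  have h0 : pvInv w1 w2 0 0 (List.replicate (w1.length+1) (List.replicate (w2.length+1) (0:Int))) := by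
    refine ⟨⟨by simp, fun r => ?_⟩, fun r c hc => ⟨by omega, by omega⟩⟩
    by_cases hr : r < w1.length + 1
    · rw [List.getD_eq_getElem _ _ (by simpa using hr)]
      simp [hr]
    · rw [List.getD_eq_default _ _ (by simpa using hr)]
      simp [hr]
  have key : ∀ k, k ≤ w1.length + 1 →
      pvInv w1 w2 k 0 ((List.range k).foldl (pvRow w1 w2 w2.length)
        (List.replicate (w1.length+1) (List.replicate (w2.length+1) (0:Int)))) := by
    intro k
    induction k with
    | zero => intro _; simpa using h0
    | succ k ih =>
      intro hk
      rw [List.range_succ, List.foldl_append]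
      simpa using pvRow_inv (by omega) (ih (by omega))
  have hfin := key (w1.length + 1) (le_refl _)
  obtain ⟨hs, hv⟩ := hfin
  have := (hv w1.length w2.length (le_refl _)).1 (by omega)
  simp only [this]
  unfold pvLf
  simp

-- the per-pair conditions agree
lemma pvPair_iff (x y : String) :
    (levenshtein_distance x y > 1) ↔ pvClose x y = false := by
  rw [pvLev_eq]
  have h1 : (1:Int) < (lev x.toList.reverse y.toList.reverse : Int) ↔
      ¬ lev x.toList.reverse y.toList.reverse ≤ 1 := by
    constructor <;> intro h <;> [omega; (push_cast; omega)]
  rw [gt_iff_lt, h1, lev_le_one_iff, close_rev_iff]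
  rw [← pvCloseL_iff_close]
  unfold pvClose
  constructor
  · intro h
    cases hb : pvCloseL x.toList y.toList
    · rfl
    · exact absurd hb h
  · intro h hb
    rw [h] at hb
    exact Bool.false_ne_true hb

-- per-pair cost
def pvC (x y : String) : Int := if pvClose x y then 0 else 1

-- B's zip fold as a sum
lemma pvZipFold (ws1 ws2 : List String) : ∀ (a : Int),
    (ws1.zip ws2).foldl (fun d p => if pvClose p.1 p.2 then d else d + 1) a =
      a + ((ws1.zip ws2).map (fun p => pvC p.1 p.2)).sum := by
  induction ws1.zip ws2 with
  | nil => intro a; simp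
  | cons p t ih =>
    intro a
    simp only [List.foldl_cons, List.map_cons, List.sum_cons, ih]
    unfold pvC
    by_cases h : pvClose p.1 p.2 = true <;> simp [h] <;> ring

lemma pvFoldConst : ∀ (l : List Nat) (a : Int),
    l.foldl (fun (d : Int) (_ : Nat) => d + 1) a = a + l.length := by
  intro l
  induction l with
  | nil => intro a; simp
  | cons h t ih => intro a; simp only [List.foldl_cons, List.length_cons, ih]; push_cast; ring

-- A's range fold as the same sum plus the length difference
lemma pvAFold : ∀ (ws1 ws2 : List String) (a : Int),
    (List.range (max ws1.length ws2.length)).foldl (fun diff i =>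
      if ws1.length ≤ i ∨ ws2.length ≤ i then diff + 1
      else if levenshtein_distance (ws1.getD i "") (ws2.getD i "") > 1 then diff + 1
      else diff) a =
    a + (((ws1.length : Int) - (ws2.length : Int)).natAbs : Int) +
      ((ws1.zip ws2).map (fun p => pvC p.1 p.2)).sum := by
  intro ws1
  induction ws1 with
  | nil =>
    intro ws2 a
    simp only [List.length_nil, List.zip_nil_left, List.map_nil, List.sum_nil, Nat.zero_le,
      true_or, if_true, Nat.max_eq_right (Nat.zero_le _), add_zero]
    rw [pvFoldConst]
    simp only [List.length_range]
    omega
  | cons x t1 ih =>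
    intro ws2 a
    cases ws2 with
    | nil =>
      simp only [List.length_nil, List.zip_nil_right, List.map_nil, List.sum_nil, Nat.zero_le,
        or_true, if_true, Nat.max_eq_left (Nat.zero_le _), add_zero]
      rw [pvFoldConst]
      simp only [List.length_range, List.length_cons, List.length_nil]
      omega
    | cons y t2 =>
      have hmax : max (x::t1).length (y::t2).length = max t1.length t2.length + 1 := by
        simp [Nat.succ_max_succ]
      rw [hmax, List.range_succ_eq_map, List.foldl_cons, List.foldl_map]
      have hstep0 : (if (x::t1).length ≤ 0 ∨ (y::t2).length ≤ 0 then a + 1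
          else if levenshtein_distance ((x::t1).getD 0 "") ((y::t2).getD 0 "") > 1 then a + 1
          else a) = a + pvC x y := by
        have hc : ¬ ((x::t1).length ≤ 0 ∨ (y::t2).length ≤ 0) := by simp
        rw [if_neg hc]
        simp only [List.getD_cons_zero]
        by_cases h : pvClose x y = true
        · rw [if_neg (by rw [pvPair_iff, h]; simp), pvC, if_pos h]; ring
        · rw [if_pos (by rw [pvPair_iff]; simpa using h), pvC, if_neg h]
      have hcongr : ∀ (acc : Int), (List.range (max t1.length t2.length)).foldl
          (fun diff i =>
            if (x::t1).length ≤ i + 1 ∨ (y::t2).length ≤ i + 1 then diff + 1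
            else if levenshtein_distance ((x::t1).getD (i+1) "") ((y::t2).getD (i+1) "") > 1 then diff + 1
            else diff) acc =
          (List.range (max t1.length t2.length)).foldl
          (fun diff i =>
            if t1.length ≤ i ∨ t2.length ≤ i then diff + 1
            else if levenshtein_distance (t1.getD i "") (t2.getD i "") > 1 then diff + 1
            else diff) acc := by
        intro acc
        apply PySem.List.foldl_congr_mem
        intro b i _
        simp only [List.length_cons, Nat.add_le_add_iff_right, List.getD_cons_succ]
      simp only [hstep0]
      rw [hcongr, ih t2 (a + pvC x y)]
      have habs : ((((x::t1).length : Int) - ((y::t2).length : Int)).natAbs : Int) =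
          (((t1.length : Int) - (t2.length : Int)).natAbs : Int) := by
        simp only [List.length_cons]
        omega
      simp only [List.zip_cons_cons, List.map_cons, List.sum_cons, habs]
      ring

-- ===== VERDICT (by name: the statement is the Claim_ definition above) =====
theorem sequence_difference_spec : Claim_equal_sequence_difference := by
  intro words1 words2 _
  unfold Spec_sequence_difference sequence_difference sequence_difference_alt
  rw [pvAFold, pvZipFold]
  ring
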